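-- pv_equiv track=rewrite | github.com/pypi-data/pypi-mirror-30 | packages/reflowrst/reflowrst-1.1.0.tar.gz/reflowrst-1.1.0/reflowrst/reflow.py | make_final_cell_widths
-- ===== SOURCE A (Python) =====
-- def getSpanColumnCount(span):
--     """Gets the number of columns inluded in a span"""
--     columns = 1
--     first_column = span[0][1]
--     for i in range(len(span)):
--         if span[i][1] > first_column:
--             columns += 1
--             first_column = span[i][1]
--     return columns
--
-- def make_final_cell_widths(table, spans, column_widths):
--     '''
--     Determine the final width of each cell. This should be the same
--     as the column widths for normal cells, but will be different for
--     column-spanded cells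
--     '''
--     cell_widths = []
--     for row in range(len(table)):
--         cell_widths.append([])
--         for column in range(len(table[row])):
--             cell_widths[-1].append(column_widths[column])
--
--     for row in range(len(table)):
--         for column in range(len(table[row])):
--             width = column_widths[column]
--             for span in spans:
--                 if [row, column] in span:
--                     span_col_count = getSpanColumnCount(span)
--                     if span_col_count > 1:
--                         r = span[0][0]
--                         c = span[0][1]
--                         width = sum(column_widths[c: c + span_col_count + 1]) + (span_col_count - 1)
--             cell_widths[row][column] = width
--     return cell_widths
-- ===== SOURCE B (Python) =====
-- def getSpanColumnCount(span):
--     """Gets the number of columns inluded in a span"""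
--     columns = 1
--     first_column = span[0][1]
--     for i in range(len(span)):
--         if span[i][1] > first_column:
--             columns += 1
--             first_column = span[i][1]
--     return columns
--
-- def make_final_cell_widths(table, spans, column_widths):
--     '''
--     Determine the final width of each cell. This should be the same
--     as the column widths for normal cells, but will be different for
--     column-spanded cells
--     '''
--     cell_widths = [[column_widths[column] for column in range(len(row))]
--                    for row in table]
--     for span in spans:
--         # cells of this span that actually name a position in the table
--         cells = [cell for cell in span
--                  if len(cell) == 2
--                  and 0 <= cell[0] < len(table)
--                  and 0 <= cell[1] < len(table[cell[0]])]
--         if cells: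
--             span_col_count = getSpanColumnCount(span)
--             if span_col_count > 1:
--                 c = span[0][1]
--                 width = sum(column_widths[c: c + span_col_count + 1]) + (span_col_count - 1)
--                 for r, col in cells:
--                     cell_widths[r][col] = width
--     return cell_widths
-- ===== Notes on version B (the rewrite author's own statement) =====
-- stated objective: faster
-- what changed: Instead of rescanning the whole span list (and recomputing the span's column count and width) for every single cell, B initializes the grid by comprehension and then makes one scatter pass over spans, writing each multi-column span's width directly into its in-bounds cells in span order so last-wins overwriting is preserved.
import Mathlib
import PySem

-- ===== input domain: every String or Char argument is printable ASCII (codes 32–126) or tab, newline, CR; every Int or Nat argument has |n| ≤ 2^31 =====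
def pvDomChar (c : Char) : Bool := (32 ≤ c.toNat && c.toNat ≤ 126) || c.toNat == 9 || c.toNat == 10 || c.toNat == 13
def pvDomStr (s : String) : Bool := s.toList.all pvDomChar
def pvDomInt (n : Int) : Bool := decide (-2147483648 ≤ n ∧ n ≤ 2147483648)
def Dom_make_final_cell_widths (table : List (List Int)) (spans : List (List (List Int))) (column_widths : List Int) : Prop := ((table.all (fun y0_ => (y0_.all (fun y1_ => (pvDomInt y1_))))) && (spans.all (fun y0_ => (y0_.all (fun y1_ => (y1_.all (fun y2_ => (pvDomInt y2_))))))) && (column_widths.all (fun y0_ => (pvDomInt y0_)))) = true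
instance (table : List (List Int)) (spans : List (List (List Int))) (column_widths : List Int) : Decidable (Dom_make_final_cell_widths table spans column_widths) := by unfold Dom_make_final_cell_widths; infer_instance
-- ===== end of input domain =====

-- B replaces A's per-cell rescan of all spans by a single scatter pass over the spans (faster by
-- removing the inner scan); equivalence of the return values is proved on Pre_ (where Python A returns).

-- ===== PORT A =====
-- shared helper of both Python files, ported once: getSpanColumnCount
-- (Python indexes span[0][1] and span[i][1]; List.getD with default 0 is exact whenever Pre_ holds,
--  because Pre_ guarantees every entry of a reached span has length ≥ 2)
def getSpanColumnCount (span : List (List Int)) : Int :=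
  let first_column := (span.getD 0 []).getD 1 0
  (span.foldl
    (fun (st : Int × Int) cell =>
      if cell.getD 1 0 > st.2 then (st.1 + 1, cell.getD 1 0) else st)
    (1, first_column)).1

-- A first builds cell_widths with entry column_widths[column] for every cell of table's shape, then
-- the second nested loop overwrites EVERY cell (same row/column ranges), starting each cell's width
-- at column_widths[column] again; the map below is that computation cell by cell, the inner foldl
-- being the 'for span in spans' loop with the same start value.
def make_final_cell_widths (table : List (List Int)) (spans : List (List (List Int))) (column_widths : List Int) : List (List Int) :=
  (List.range table.length).map (fun (row : Nat) =>
    (List.range (table.getD row []).length).map (fun (column : Nat) =>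
      spans.foldl (fun width span =>
        if [(row : Int), (column : Int)] ∈ span then
          let span_col_count := getSpanColumnCount span
          if span_col_count > 1 then
            (PySem.List.slice column_widths (some ((span.getD 0 []).getD 1 0))
              (some ((span.getD 0 []).getD 1 0 + span_col_count + 1))).sum + (span_col_count - 1)
          else width
        else width)
        (column_widths.getD column 0)))

-- ===== PORT B =====
-- 'len(cell) == 2 and 0 <= cell[0] < len(table) and 0 <= cell[1] < len(table[cell[0]])'
def cellInTable (table : List (List Int)) (cell : List Int) : Bool :=
  cell.length == 2 && decide (0 ≤ cell.getD 0 0) && decide (cell.getD 0 0 < (table.length : Int))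
    && decide (0 ≤ cell.getD 1 0)
    && decide (cell.getD 1 0 < ((table.getD (cell.getD 0 0).toNat []).length : Int))

-- 'cell_widths[r][col] = width'  (both indices already checked 0 ≤ · < bound by cellInTable)
def writeCell (g : List (List Int)) (cell : List Int) (width : Int) : List (List Int) :=
  g.set (cell.getD 0 0).toNat (((g.getD (cell.getD 0 0).toNat []).set (cell.getD 1 0).toNat width))

def make_final_cell_widths_alt (table : List (List Int)) (spans : List (List (List Int))) (column_widths : List Int) : List (List Int) :=
  let init := table.map (fun row => (List.range row.length).map (fun column => column_widths.getD column 0))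
  spans.foldl (fun g span =>
    let cells := span.filter (cellInTable table)
    if cells.isEmpty then g
    else
      let span_col_count := getSpanColumnCount span
      if span_col_count > 1 then
        let width := (PySem.List.slice column_widths (some ((span.getD 0 []).getD 1 0))
          (some ((span.getD 0 []).getD 1 0 + span_col_count + 1))).sum + (span_col_count - 1)
        cells.foldl (fun g cell => writeCell g cell width) g
      else g) init

-- ===== PRECONDITION & SPEC =====
-- Pre_ excludes exactly the inputs on which Python A raises IndexError: a table row longer than
-- column_widths, or a span that covers some table cell while containing an entry with fewer than
-- two coordinates.
def Pre_make_final_cell_widths (table : List (List Int)) (spans : List (List (List Int))) (column_widths : List Int) : Prop :=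
  (∀ row ∈ table, row.length ≤ column_widths.length) ∧
  ∀ span ∈ spans,
    (∃ r ∈ List.range table.length, ∃ c ∈ List.range (table.getD r []).length,
        [(r : Int), (c : Int)] ∈ span) →
    ∀ cell ∈ span, 2 ≤ cell.length

instance (table : List (List Int)) (spans : List (List (List Int))) (column_widths : List Int) : Decidable (Pre_make_final_cell_widths table spans column_widths) := by
  unfold Pre_make_final_cell_widths; infer_instance

def pvWitness_make_final_cell_widths : List (List Int) × List (List (List Int)) × List Int :=
  ([[1, 2], [3]], [[[0, 0], [0, 1]]], [4, 5])

def Spec_make_final_cell_widths (table : List (List Int)) (spans : List (List (List Int))) (column_widths : List Int) (out : List (List Int)) : Prop := out = make_final_cell_widths_alt table spans column_widths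
instance (table : List (List Int)) (spans : List (List (List Int))) (column_widths : List Int) (out : List (List Int)) : Decidable (Spec_make_final_cell_widths table spans column_widths out) := by unfold Spec_make_final_cell_widths; infer_instance

-- ===== CLAIM (what is proved, stated in full; the proofs are below) =====
def Claim_equal_make_final_cell_widths : Prop := ∀ (table : List (List Int)) (spans : List (List (List Int))) (column_widths : List Int), Dom_make_final_cell_widths table spans column_widths → Pre_make_final_cell_widths table spans column_widths → Spec_make_final_cell_widths table spans column_widths (make_final_cell_widths table spans column_widths)

-- ===== LEMMAS AND PROOFS =====

-- A's per-span step for the cell (row, column)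
def stepA (column_widths : List Int) (row column : Nat) (width : Int) (span : List (List Int)) : Int :=
  if [(row : Int), (column : Int)] ∈ span then
    if getSpanColumnCount span > 1 then
      (PySem.List.slice column_widths (some ((span.getD 0 []).getD 1 0))
        (some ((span.getD 0 []).getD 1 0 + getSpanColumnCount span + 1))).sum + (getSpanColumnCount span - 1)
    else width
  else width

-- B's per-span step on the whole grid
def stepB (table : List (List Int)) (column_widths : List Int) (g : List (List Int)) (span : List (List Int)) : List (List Int) :=
  if (span.filter (cellInTable table)).isEmpty then g
  else
    if getSpanColumnCount span > 1 then
      (span.filter (cellInTable table)).foldl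
        (fun g cell => writeCell g cell
          ((PySem.List.slice column_widths (some ((span.getD 0 []).getD 1 0))
            (some ((span.getD 0 []).getD 1 0 + getSpanColumnCount span + 1))).sum + (getSpanColumnCount span - 1))) g
    else g

theorem A_as_fold (table : List (List Int)) (spans : List (List (List Int))) (cw : List Int) :
    make_final_cell_widths table spans cw =
      (List.range table.length).map (fun (row : Nat) =>
        (List.range (table.getD row []).length).map (fun (column : Nat) =>
          spans.foldl (stepA cw row column) (cw.getD column 0))) := rfl

theorem B_as_fold (table : List (List Int)) (spans : List (List (List Int))) (cw : List Int) :
    make_final_cell_widths_alt table spans cw =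
      spans.foldl (stepB table cw)
        (table.map (fun row => (List.range row.length).map (fun column => cw.getD column 0))) := rfl

-- shape bookkeeping
def SameShape (table g : List (List Int)) : Prop :=
  g.length = table.length ∧ ∀ r, (g.getD r []).length = (table.getD r []).length

theorem getD_set_ne {a : Type} [Inhabited a] (l : List a) (i r : Nat) (x d : a)
    (h : r ≠ i) : (l.set i x).getD r d = l.getD r d := by
  rw [List.getD_eq_getElem?_getD, List.getD_eq_getElem?_getD, List.getElem?_set_ne (Ne.symm h)]

theorem getD_set_self {a : Type} [Inhabited a] (l : List a) (i : Nat) (x d : a)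
    (h : i < l.length) : (l.set i x).getD i d = x := by
  rw [List.getD_eq_getElem?_getD, List.getElem?_set_self h, Option.getD_some]

theorem getD_writeCell_ne (g : List (List Int)) (cell : List Int) (w : Int) (r : Nat)
    (hr : r ≠ (cell.getD 0 0).toNat) : (writeCell g cell w).getD r [] = g.getD r [] :=
  getD_set_ne g _ r _ _ hr

theorem getD_writeCell_self (g : List (List Int)) (cell : List Int) (w : Int)
    (h : (cell.getD 0 0).toNat < g.length) :
    (writeCell g cell w).getD (cell.getD 0 0).toNat [] =
      (g.getD (cell.getD 0 0).toNat []).set (cell.getD 1 0).toNat w :=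
  getD_set_self g _ _ _ h

theorem writeCell_shape (table g : List (List Int)) (cell : List Int) (w : Int)
    (h : SameShape table g) : SameShape table (writeCell g cell w) := by
  obtain ⟨h1, h2⟩ := h
  constructor
  · simp [writeCell, h1]
  intro r
  rcases eq_or_ne r (cell.getD 0 0).toNat with hr | hr
  · subst hr
    by_cases hlt : (cell.getD 0 0).toNat < g.length
    · rw [getD_writeCell_self g cell w hlt]
      simpa using h2 _
    · unfold writeCell
      rw [List.set_eq_of_length_le (by omega)]
      exact h2 _
  · rw [getD_writeCell_ne g cell w r hr]
    exact h2 r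

theorem writes_shape (table : List (List Int)) (w : Int) :
    ∀ (cells : List (List Int)) (g : List (List Int)), SameShape table g →
      SameShape table (cells.foldl (fun g cell => writeCell g cell w) g) := by
  intro cells
  induction cells with
  | nil => intro g h; exact h
  | cons c cs ih => intro g h; exact ih _ (writeCell_shape table g c w h)

theorem stepB_shape (table g : List (List Int)) (cw : List Int) (span : List (List Int))
    (h : SameShape table g) : SameShape table (stepB table cw g span) := by
  unfold stepB
  split
  · exact h
  · split
    · exact writes_shape table _ _ g h
    · exact h

-- what B's bounds test means
theorem cellInTable_spec (table : List (List Int)) (cell : List Int)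
    (h : cellInTable table cell = true) :
    ∃ a b : Int, cell = [a, b] ∧ 0 ≤ a ∧ a.toNat < table.length ∧ 0 ≤ b ∧
      b.toNat < (table.getD a.toNat []).length := by
  simp only [cellInTable, Bool.and_eq_true, beq_iff_eq, decide_eq_true_eq] at h
  obtain ⟨⟨⟨⟨hlen, ha0⟩, ha1⟩, hb0⟩, hb1⟩ := h
  match cell, hlen with
  | [a, b], _ =>
    have e0 : ([a, b] : List Int).getD 0 0 = a := rfl
    have e1 : ([a, b] : List Int).getD 1 0 = b := rfl
    rw [e0] at ha0 ha1 hb1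
    rw [e1] at hb0 hb1
    exact ⟨a, b, rfl, ha0, by omega, hb0, by omega⟩

theorem cellInTable_pos (table : List (List Int)) (row col : Nat)
    (hr : row < table.length) (hc : col < (table.getD row []).length) :
    cellInTable table [(row : Int), (col : Int)] = true := by
  have e0 : ([(row : Int), (col : Int)] : List Int).getD 0 0 = (row : Int) := rfl
  have e1 : ([(row : Int), (col : Int)] : List Int).getD 1 0 = (col : Int) := rfl
  simp only [cellInTable, Bool.and_eq_true, beq_iff_eq, decide_eq_true_eq, e0, e1,
    Int.toNat_natCast]
  refine ⟨⟨⟨⟨by simp, by omega⟩, by exact_mod_cast hr⟩, by omega⟩, by exact_mod_cast hc⟩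

-- the grid after writing width w into every cell of `cells` (all of them inside the table)
theorem writes_get (table : List (List Int)) (w : Int) (row col : Nat)
    (hr : row < table.length) (hc : col < (table.getD row []).length) :
    ∀ (cells : List (List Int)) (g : List (List Int)), SameShape table g →
      (∀ cell ∈ cells, cellInTable table cell = true) →
      ((cells.foldl (fun g cell => writeCell g cell w) g).getD row []).getD col 0 =
        if [(row : Int), (col : Int)] ∈ cells then w else (g.getD row []).getD col 0 := by
  intro cells
  induction cells with
  | nil => intro g _ _; simp
  | cons cell cs ih =>
    intro g hsh hall
    have hglen : g.length = table.length := hsh.1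
    rw [List.foldl_cons, ih _ (writeCell_shape table g cell w hsh)
      (fun c hc' => hall c (List.mem_cons_of_mem _ hc'))]
    by_cases hin : [(row : Int), (col : Int)] ∈ cs
    · simp [hin]
    · obtain ⟨a, b, hcell, ha0, ha1, hb0, hb1⟩ :=
        cellInTable_spec table cell (hall cell List.mem_cons_self)
      have hgd0 : cell.getD 0 0 = a := by rw [hcell]; rfl
      have hgd1 : cell.getD 1 0 = b := by rw [hcell]; rfl
      by_cases heq : cell = [(row : Int), (col : Int)]
      · have hmem : [(row : Int), (col : Int)] ∈ cell :: cs := by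
          rw [← heq]; exact List.mem_cons_self
        rw [if_neg hin, if_pos hmem]
        have hget0 : (cell.getD 0 0).toNat = row := by rw [heq]; simp [List.getD]
        have hget1 : (cell.getD 1 0).toNat = col := by rw [heq]; simp [List.getD]
        rw [← hget0, ← hget1, getD_writeCell_self g cell w (by omega)]
        exact getD_set_self _ _ _ _ (by rw [(hsh.2 (cell.getD 0 0).toNat), hget0]; omega)
      · rw [if_neg hin, if_neg (by
          intro hmem
          rcases List.mem_cons.mp hmem with h' | h'
          · exact heq h'.symm
          · exact hin h')]
        rcases eq_or_ne (cell.getD 0 0).toNat row with h0 | h0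
        · -- same row, different column
          have hbc : (cell.getD 1 0).toNat ≠ col := by
            intro hbc
            apply heq
            rw [hcell]
            have h1' : a = (row : Int) := by omega
            have h2' : b = (col : Int) := by rw [hgd1] at hbc; omega
            rw [h1', h2']
          rw [← h0, getD_writeCell_self g cell w (by omega)]
          exact getD_set_ne _ _ _ _ _ (Ne.symm hbc)
        · rw [getD_writeCell_ne g cell w row (Ne.symm h0)]

-- one span transforms every in-table cell exactly as A's per-cell step does
theorem stepB_get (table g : List (List Int)) (cw : List Int) (span : List (List Int))
    (h : SameShape table g) (row col : Nat)
    (hr : row < table.length) (hc : col < (table.getD row []).length) :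
    ((stepB table cw g span).getD row []).getD col 0 =
      stepA cw row col ((g.getD row []).getD col 0) span := by
  have hmem_filter : [(row : Int), (col : Int)] ∈ span.filter (cellInTable table) ↔
      [(row : Int), (col : Int)] ∈ span := by
    rw [List.mem_filter]
    exact ⟨fun h' => h'.1, fun h' => ⟨h', cellInTable_pos table row col hr hc⟩⟩
  unfold stepB stepA
  by_cases hemp : (span.filter (cellInTable table)).isEmpty
  · rw [if_pos hemp, if_neg (by
      intro hmem
      rw [List.isEmpty_iff] at hemp
      rw [← hmem_filter] at hmem
      simp [hemp] at hmem)]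
  · rw [if_neg hemp]
    by_cases hcnt : getSpanColumnCount span > 1
    · rw [if_pos hcnt]
      rw [writes_get table _ row col hr hc _ g h (fun c hc' => (List.mem_filter.mp hc').2)]
      simp only [hmem_filter]
      by_cases hmem : [(row : Int), (col : Int)] ∈ span
      · rw [if_pos hmem, if_pos hmem, if_pos hcnt]
      · rw [if_neg hmem, if_neg hmem]
    · rw [if_neg hcnt]
      by_cases hmem : [(row : Int), (col : Int)] ∈ span
      · rw [if_pos hmem, if_neg hcnt]
      · rw [if_neg hmem]

theorem foldB_get (table : List (List Int)) (cw : List Int) :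
    ∀ (ss : List (List (List Int))) (g : List (List Int)), SameShape table g →
      ∀ row col, row < table.length → col < (table.getD row []).length →
        ((ss.foldl (stepB table cw) g).getD row []).getD col 0 =
          ss.foldl (stepA cw row col) ((g.getD row []).getD col 0) := by
  intro ss
  induction ss with
  | nil => intro g h row col hr hc; rfl
  | cons sp ss ih =>
    intro g h row col hr hc
    simp only [List.foldl_cons]
    rw [ih _ (stepB_shape table g cw sp h) row col hr hc, stepB_get table g cw sp h row col hr hc]

theorem foldB_shape (table : List (List Int)) (cw : List Int) :
    ∀ (ss : List (List (List Int))) (g : List (List Int)), SameShape table g →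
      SameShape table (ss.foldl (stepB table cw) g) := by
  intro ss
  induction ss with
  | nil => intro g h; exact h
  | cons sp ss ih => intro g h; exact ih _ (stepB_shape table g cw sp h)

theorem init_getD (table : List (List Int)) (cw : List Int) (i : Nat) (hi : i < table.length) :
    (table.map (fun row => (List.range row.length).map (fun column => cw.getD column 0))).getD i [] =
      (List.range (table.getD i []).length).map (fun column => cw.getD column 0) := by
  rw [List.getD_eq_getElem _ _ (by simpa using hi), List.getElem_map,
    List.getD_eq_getElem _ _ hi]

theorem init_shape (table : List (List Int)) (cw : List Int) :
    SameShape table (table.map (fun row => (List.range row.length).map (fun column => cw.getD column 0))) := by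
  refine ⟨by simp, fun r => ?_⟩
  by_cases hr : r < table.length
  · rw [init_getD table cw r hr]; simp
  · rw [List.getD_eq_getElem?_getD, List.getD_eq_getElem?_getD,
      List.getElem?_eq_none (by simpa using hr), List.getElem?_eq_none (by omega)]

-- ===== VERDICT (by name: the statement is the Claim_ definition above) =====
theorem make_final_cell_widths_spec : Claim_equal_make_final_cell_widths := by
  intro table spans cw _hDom _hPre
  unfold Spec_make_final_cell_widths
  rw [A_as_fold, B_as_fold]
  have hshape := foldB_shape table cw spans _ (init_shape table cw)
  apply List.ext_getElem
  · simpa using hshape.1.symm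
  · intro i h1 h2
    have hi : i < table.length := by simpa using h1
    rw [List.getElem_map, List.getElem_range]
    apply List.ext_getElem
    · rw [List.length_map, List.length_range, ← List.getD_eq_getElem _ ([] : List Int) h2]
      exact (hshape.2 i).symm
    · intro j hj1 hj2
      have hj : j < (table.getD i []).length := by simpa using hj1
      rw [List.getElem_map, List.getElem_range]
      have key := foldB_get table cw spans _ (init_shape table cw) i j hi hj
      rw [List.getD_eq_getElem _ ([] : List Int) h2] at key
      rw [List.getD_eq_getElem _ (0 : Int) hj2] at key
      rw [init_getD table cw i hi,
        List.getD_eq_getElem _ (0 : Int) (by simpa using hj), List.getElem_map,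
        List.getElem_range] at key
      exact key.symm
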